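-- pv_equiv track=rewrite | github.com/PlacidoMaidana/ProyectosDeInvestigacion | importar_texto.py | _procesar_texto_a_documentos
-- ===== SOURCE A (Python) =====
-- def _procesar_texto_a_documentos(texto):
--     # Dividir el texto en líneas
--     lineas = texto.split("\n")
--
--     # Procesar líneas en pares (título y enlace)
--     documentos = []
--     for i in range(0, len(lineas), 3):  # Iterar cada 3 líneas (título, enlace, espacio)
--         titulo = lineas[i].strip() if i < len(lineas) else None
--         enlace = lineas[i + 1].strip() if i + 1 < len(lineas) else None
--         if titulo and enlace:
--             documentos.append((titulo, enlace))
--     return documentos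
-- ===== SOURCE B (Python) =====
-- def _procesar_texto_a_documentos(texto):
--     # Single pass with an iterator: consume (titulo, enlace, separator) triples
--     # without any index arithmetic or bounds checks.
--     documentos = []
--     it = iter(texto.split("\n"))
--     for titulo in it:
--         titulo = titulo.strip()
--         enlace = next(it, "").strip()
--         if titulo and enlace:
--             documentos.append((titulo, enlace))
--         next(it, None)  # skip the blank separator line
--     return documentos
-- ===== Notes on version B (the rewrite author's own statement) =====
-- stated objective: idiomatic
-- what changed: Replaced the range(0,len,3) index loop with its i/i+1 bounds checks and Option-valued titulo/enlace by a single iterator-based pass that consumes (title, link, separator) triples with next() defaults and no index arithmetic.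
import Mathlib
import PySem

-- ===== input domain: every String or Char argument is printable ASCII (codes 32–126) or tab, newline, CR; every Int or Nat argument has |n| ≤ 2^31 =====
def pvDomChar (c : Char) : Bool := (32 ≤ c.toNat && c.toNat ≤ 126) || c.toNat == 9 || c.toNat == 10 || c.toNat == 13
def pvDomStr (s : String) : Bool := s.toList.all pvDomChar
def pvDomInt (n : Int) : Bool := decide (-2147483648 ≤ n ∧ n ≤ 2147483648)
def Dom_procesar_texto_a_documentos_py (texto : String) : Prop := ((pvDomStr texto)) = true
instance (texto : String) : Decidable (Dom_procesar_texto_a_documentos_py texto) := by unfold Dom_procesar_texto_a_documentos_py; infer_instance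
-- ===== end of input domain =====

-- B replaces A's step-3 index loop with its i/i+1 bounds checks by a single iterator-style
-- pass consuming (title, link, separator) triples; objective: idiomatic (no speed claim).


-- ===== PORT A =====
def procesar_texto_a_documentos_py (texto : String) : List (String × String) :=
  let lineas := (PySem.Str.split? texto "\n").getD []
  (PySem.List.pyRange 0 (lineas.length : Int) 3).foldl (fun documentos i =>
    let titulo : Option String :=
      if i < (lineas.length : Int) then (PySem.List.pyGet? lineas i).map PySem.Str.strip else none
    let enlace : Option String :=
      if i + 1 < (lineas.length : Int) then (PySem.List.pyGet? lineas (i + 1)).map PySem.Str.strip else none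
    match titulo, enlace with
    | some t, some e => if t ≠ "" ∧ e ≠ "" then documentos ++ [(t, e)] else documentos
    | _, _ => documentos) []

-- ===== PORT B =====
-- the 'for titulo in it' loop of Source B: peel the title, read the link from the head of the
-- remainder ("" when exhausted, like next(it, "")), then skip the separator line (drop 2)
def pvEmparejaLoop (lineas : List String) (documentos : List (String × String)) : List (String × String) :=
  match lineas with
  | [] => documentos
  | titulo :: rest =>
    let t := PySem.Str.strip titulo
    let e := match rest with | enlace :: _ => PySem.Str.strip enlace | [] => ""
    pvEmparejaLoop (rest.drop 2) (if t ≠ "" ∧ e ≠ "" then documentos ++ [(t, e)] else documentos)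
termination_by lineas.length
decreasing_by simp

def procesar_texto_a_documentos_py_alt (texto : String) : List (String × String) :=
  pvEmparejaLoop ((PySem.Str.split? texto "\n").getD []) []

-- ===== PRECONDITION & SPEC =====
def Spec_procesar_texto_a_documentos_py (texto : String) (out : List (String × String)) : Prop := out = procesar_texto_a_documentos_py_alt texto
instance (texto : String) (out : List (String × String)) : Decidable (Spec_procesar_texto_a_documentos_py texto out) := by unfold Spec_procesar_texto_a_documentos_py; infer_instance

-- ===== CLAIM (what is proved, stated in full; the proofs are below) =====
def Claim_equal_procesar_texto_a_documentos_py : Prop := ∀ (texto : String), Dom_procesar_texto_a_documentos_py texto → Spec_procesar_texto_a_documentos_py texto (procesar_texto_a_documentos_py texto)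

-- ===== LEMMAS AND PROOFS =====

-- A's loop body as a named function (definitionally equal to the lambda in port A)
def pvABody (ls : List String) (documentos : List (String × String)) (i : Int) : List (String × String) :=
  let titulo : Option String :=
    if i < (ls.length : Int) then (PySem.List.pyGet? ls i).map PySem.Str.strip else none
  let enlace : Option String :=
    if i + 1 < (ls.length : Int) then (PySem.List.pyGet? ls (i + 1)).map PySem.Str.strip else none
  match titulo, enlace with
  | some t, some e => if t ≠ "" ∧ e ≠ "" then documentos ++ [(t, e)] else documentos
  | _, _ => documentos

lemma pyGet?_nonneg {α : Type} (xs : List α) (i : Int) (h : 0 ≤ i) :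
    PySem.List.pyGet? xs i = xs[i.toNat]? := by
  rw [show i = ((i.toNat : Nat) : Int) by omega, PySem.List.pyGet?_natCast, Int.toNat_natCast]

lemma body_shift (x y z : String) (r : List String) (d : List (String × String)) (i : Int) (h : 0 ≤ i) :
    pvABody (x :: y :: z :: r) d (i + 3) = pvABody r d i := by
  have h1 : (i + 3).toNat = i.toNat + 3 := by omega
  have h2 : (i + 3 + 1).toNat = i.toNat + 4 := by omega
  simp only [pvABody, pyGet?_nonneg _ _ (by omega : (0:Int) ≤ i + 3),
    pyGet?_nonneg _ _ (by omega : (0:Int) ≤ i + 3 + 1), pyGet?_nonneg _ _ h,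
    pyGet?_nonneg _ _ (by omega : (0:Int) ≤ i + 1), h1, h2,
    show (i+1).toNat = i.toNat + 1 by omega]
  simp only [List.getElem?_cons_succ, List.length_cons]
  have g1 : (i + 3 < ((r.length + 1 + 1 + 1 : Nat) : Int)) ↔ (i < (r.length : Int)) := by
    push_cast; omega
  have g2 : (i + 3 + 1 < ((r.length + 1 + 1 + 1 : Nat) : Int)) ↔ (i + 1 < (r.length : Int)) := by
    push_cast; omega
  simp only [g1, g2]

lemma pyRange3_nil (a b : Int) (h : b ≤ a) : PySem.List.pyRange a b 3 = [] := by
  simp [PySem.List.pyRange]; intro hlt; omega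

lemma pyRange3_cons_zero (b : Int) (h : 0 < b) :
    PySem.List.pyRange 0 b 3 = 0 :: (PySem.List.pyRange 0 (b - 3) 3).map (· + 3) := by
  simp only [PySem.List.pyRange]
  norm_num
  by_cases h3 : 3 < b
  · rw [if_pos h, if_pos h3]
    have hc : ((b + 3 - 1) / 3).toNat = ((b - 1) / 3).toNat + 1 := by omega
    rw [hc, List.range_succ_eq_map, List.map_cons, List.map_map]
    norm_num
    intro a _
    ring
  · rw [if_pos h, if_neg h3]
    have hc : ((b + 3 - 1) / 3).toNat = 1 := by omega
    rw [hc]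
    simp

lemma mem_pyRange3_zero_nonneg {b i : Int} (h : i ∈ PySem.List.pyRange 0 b 3) : 0 ≤ i := by
  simp [PySem.List.pyRange] at h
  obtain ⟨k, -, rfl⟩ := h
  positivity

lemma loop_eq (N : Nat) : ∀ (ls : List String), ls.length ≤ N → ∀ docs,
    (PySem.List.pyRange 0 (ls.length : Int) 3).foldl (pvABody ls) docs = pvEmparejaLoop ls docs := by
  induction N with
  | zero =>
    intro ls h docs
    have : ls = [] := List.length_eq_zero_iff.mp (Nat.le_zero.mp h)
    subst this
    simp [pvEmparejaLoop, pyRange3_nil 0 0 le_rfl]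
  | succ N ih =>
    intro ls hlen docs
    match ls with
    | [] => simp [pvEmparejaLoop, pyRange3_nil 0 0 le_rfl]
    | x :: rest =>
      rw [pyRange3_cons_zero _ (by simp), List.foldl_cons, List.foldl_map]
      match rest with
      | [] =>
        have hstep : pvABody [x] docs 0 = docs := by
          simp [pvABody, PySem.List.pyGet?, PySem.List.pyIdx?]
        rw [hstep]
        rw [show ((([x] : List String).length : Int) - 3) = -2 by simp]
        rw [pyRange3_nil 0 (-2) (by omega)]
        simp [pvEmparejaLoop]
      | y :: rest2 =>
        have hstep : pvABody (x :: y :: rest2) docs 0 =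
            (if PySem.Str.strip x ≠ "" ∧ PySem.Str.strip y ≠ "" then
              docs ++ [(PySem.Str.strip x, PySem.Str.strip y)] else docs) := by
          have c0 : (0:Int) ≤ (rest2.length : Int) + 1 := by positivity
          simp [pvABody, c0, PySem.List.pyGet?, PySem.List.pyIdx?]
        rw [hstep]
        match rest2 with
        | [] =>
          rw [show ((([x, y] : List String).length : Int) - 3) = -1 by simp]
          rw [pyRange3_nil 0 (-1) (by omega)]
          simp [pvEmparejaLoop]
        | z :: r =>
          have hlen2 : (((x :: y :: z :: r).length : Int) - 3) = (r.length : Int) := by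
            simp; ring
          rw [hlen2]
          rw [List.foldl_ext _ (pvABody r) _ (fun d i hi => body_shift x y z r d i (mem_pyRange3_zero_nonneg hi))]
          rw [ih r (by simp at hlen ⊢; omega)]
          conv_rhs => rw [pvEmparejaLoop]
          simp

-- ===== VERDICT (by name: the statement is the Claim_ definition above) =====
theorem procesar_texto_a_documentos_py_spec : Claim_equal_procesar_texto_a_documentos_py := by
  intro texto _
  unfold Spec_procesar_texto_a_documentos_py procesar_texto_a_documentos_py procesar_texto_a_documentos_py_alt
  exact loop_eq ((PySem.Str.split? texto "\n").getD []).length _ le_rfl []
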